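-- pv_equiv track=rewrite | github.com/cnoe-io/ai-platform-engineering | ai_platform_engineering/dynamic_agents/src/dynamic_agents/metrics/http_middleware.py | _normalise_path
-- ===== SOURCE A (Python) =====
-- def _normalise_path(path: str) -> str:
--     """Replace likely ID segments with ``:id`` to bound cardinality."""
--     parts = path.split("/")
--     out: list[str] = []
--     for part in parts:
--         # Hex strings ≥ 20 chars (ObjectIds, UUIDs without dashes)
--         if len(part) >= 20 and all(c in "0123456789abcdef-" for c in part.lower()):
--             out.append(":id")
--         else:
--             out.append(part)
--     return "/".join(out)
-- ===== SOURCE B (Python) =====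
-- def _normalise_path(path: str) -> str:
--     """Single streaming pass: build the result while scanning characters,
--     tracking the current segment and whether it is still hex-ish."""
--     res = ""
--     seg = ""
--     hexish = True
--     for ch in path:
--         if ch == "/":
--             res += (":id" if hexish and len(seg) >= 20 else seg) + "/"
--             seg = ""
--             hexish = True
--         else:
--             seg += ch
--             hexish = hexish and ch in "0123456789abcdefABCDEF-"
--     return res + (":id" if hexish and len(seg) >= 20 else seg)
-- ===== Notes on version B (the rewrite author's own statement) =====
-- stated objective: alternative
-- what changed: Replaced split-into-parts / per-part lowercase-and-test loop / join with a single streaming character scan that maintains the current segment and an incrementally updated case-insensitive hex flag, emitting output as it goes (no parts list, no lowercasing pass, no join).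
import Mathlib
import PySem

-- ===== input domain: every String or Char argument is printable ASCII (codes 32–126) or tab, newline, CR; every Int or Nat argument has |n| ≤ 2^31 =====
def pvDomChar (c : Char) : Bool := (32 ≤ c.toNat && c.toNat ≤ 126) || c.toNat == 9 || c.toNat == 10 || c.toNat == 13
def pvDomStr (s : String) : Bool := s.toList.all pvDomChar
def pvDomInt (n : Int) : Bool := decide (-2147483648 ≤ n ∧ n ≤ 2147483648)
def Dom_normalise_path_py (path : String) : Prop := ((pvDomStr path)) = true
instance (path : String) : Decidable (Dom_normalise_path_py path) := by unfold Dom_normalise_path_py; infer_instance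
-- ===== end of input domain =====

-- B is an alternative single-pass implementation: it streams over the characters, keeping the
-- current segment and an incrementally updated case-insensitive hex flag, instead of A's
-- split / per-part lowercase-and-test / join. Same cost; proved equal on the ASCII domain.

-- ===== PORT A =====
-- 'parts = path.split("/")', the loop appending ":id" or the part, '"/".join(out)'
def normalise_path_py (path : String) : String :=
  let parts := PySem.Chars.splitOn path.toList "/".toList
  let out : List (List Char) := parts.foldl (fun out part =>
      if decide (20 ≤ part.length) &&
         (PySem.Chars.lower part).all (fun c => ("0123456789abcdef-".toList).contains c)
      then out ++ [":id".toList] else out ++ [part]) []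
  String.ofList (PySem.Chars.join "/".toList out)

-- ===== PORT B =====
-- streaming scan: state (res, seg, hexish); on '/' flush the segment, else extend it
def normalise_path_py_alt (path : String) : String :=
  let st := path.toList.foldl
    (fun (st : List Char × List Char × Bool) ch =>
      let res := st.1; let seg := st.2.1; let hexish := st.2.2
      if ch = '/' then
        (res ++ (if hexish && decide (20 ≤ seg.length) then ":id".toList else seg) ++ ['/'],
         [], true)
      else
        (res, seg ++ [ch], hexish && ("0123456789abcdefABCDEF-".toList).contains ch))
    ([], [], true)
  String.ofList (st.1 ++ (if st.2.2 && decide (20 ≤ st.2.1.length) then ":id".toList else st.2.1))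

-- ===== PRECONDITION & SPEC =====
def Spec_normalise_path_py (path : String) (out : String) : Prop := out = normalise_path_py_alt path
instance (path : String) (out : String) : Decidable (Spec_normalise_path_py path out) := by unfold Spec_normalise_path_py; infer_instance

-- ===== CLAIM (what is proved, stated in full; the proofs are below) =====
def Claim_equal_normalise_path_py : Prop := ∀ (path : String), Dom_normalise_path_py path → Spec_normalise_path_py path (normalise_path_py path)

-- ===== LEMMAS AND PROOFS =====

def pvHexA : List Char := "0123456789abcdef-".toList
def pvHexB : List Char := "0123456789abcdefABCDEF-".toList

def pvCond (part : List Char) : Bool :=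
  decide (20 ≤ part.length) && (PySem.Chars.lower part).all (fun c => pvHexA.contains c)

def pvGA (part : List Char) : List Char :=
  if pvCond part then ":id".toList else part

-- the segments path.split("/") produces, as a simple structural recursion
def pvSegs : List Char → List (List Char)
  | [] => [[]]
  | c :: rest =>
    if c = '/' then [] :: pvSegs rest
    else match pvSegs rest with
      | s :: ss => (c :: s) :: ss
      | [] => [[c]]

def pvConsHead (seg : List Char) : List (List Char) → List (List Char)
  | s :: ss => (seg ++ s) :: ss
  | [] => [seg]

def pvFlush (seg : List Char) (hx : Bool) : List Char :=
  if hx && decide (20 ≤ seg.length) then ":id".toList else seg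

-- B's output from mid-scan state, written as the recursion the fold performs
def pvOutB (seg : List Char) (hx : Bool) : List Char → List Char
  | [] => pvFlush seg hx
  | c :: rest =>
    if c = '/' then pvFlush seg hx ++ '/' :: pvOutB [] true rest
    else pvOutB (seg ++ [c]) (hx && pvHexB.contains c) rest

def pvStep (st : List Char × List Char × Bool) (ch : Char) : List Char × List Char × Bool :=
  let res := st.1; let seg := st.2.1; let hexish := st.2.2
  if ch = '/' then
    (res ++ (if hexish && decide (20 ≤ seg.length) then ":id".toList else seg) ++ ['/'],
     [], true)
  else
    (res, seg ++ [ch], hexish && ("0123456789abcdefABCDEF-".toList).contains ch)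

def pvFin (st : List Char × List Char × Bool) : List Char :=
  st.1 ++ (if st.2.2 && decide (20 ≤ st.2.1.length) then ":id".toList else st.2.1)

theorem pvB_eq (path : String) :
    normalise_path_py_alt path = String.ofList (pvFin (path.toList.foldl pvStep ([], [], true))) := rfl

theorem pvA_eq (path : String) :
    normalise_path_py path = String.ofList (PySem.Chars.join ['/']
      (List.foldl (fun out part => if pvCond part then out ++ [":id".toList] else out ++ [part])
        [] (PySem.Chars.splitOn path.toList ['/']))) := rfl

theorem pvSegs_ne_nil (l : List Char) : pvSegs l ≠ [] := by
  cases l with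
  | nil => simp [pvSegs]
  | cons c rest =>
    simp only [pvSegs]
    by_cases hc : c = '/'
    · simp [hc]
    · rw [if_neg hc]
      rcases h : pvSegs rest with _ | ⟨s, ss⟩ <;> simp

-- per-character: lowercase-then-test-A equals test-B, for ASCII characters
set_option maxRecDepth 20000 in
theorem pvCharLemma : ∀ n < 127,
    pvHexA.contains (PySem.Chars.lowerChar (Char.ofNat n)) = pvHexB.contains (Char.ofNat n) := by
  decide

theorem pvCharLemma' (c : Char) (h : pvDomChar c = true) :
    pvHexA.contains (PySem.Chars.lowerChar c) = pvHexB.contains c := by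
  have hn : c.toNat < 127 := by
    simp only [pvDomChar, Bool.or_eq_true, Bool.and_eq_true, decide_eq_true_eq,
      beq_iff_eq] at h
    omega
  have := pvCharLemma c.toNat hn
  rwa [Char.ofNat_toNat] at this

theorem pvAll_eq (L : List Char) (h : ∀ c ∈ L, pvDomChar c = true) :
    (PySem.Chars.lower L).all (fun c => pvHexA.contains c)
      = L.all (fun c => pvHexB.contains c) := by
  induction L with
  | nil => rfl
  | cons c rest ih =>
    have hc := pvCharLemma' c (h c (List.mem_cons_self ..))
    have hr := ih (fun x hx => h x (List.mem_cons_of_mem _ hx))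
    simp only [PySem.Chars.lower, List.map_cons, List.all_cons] at *
    rw [hc, hr]

theorem pvFlush_eq_gA (seg : List Char) (h : ∀ c ∈ seg, pvDomChar c = true) :
    pvFlush seg (seg.all (fun c => pvHexB.contains c)) = pvGA seg := by
  unfold pvFlush pvGA pvCond
  rw [← pvAll_eq seg h, Bool.and_comm]

-- characterisation of PySem's splitOn on the one-character separator "/"
theorem pvSplitOn_go (l : List Char) : ∀ (fuel : Nat) (cur : List Char) (acc : List (List Char)),
    l.length ≤ fuel →
    PySem.Chars.splitOn.go ['/'] fuel l cur acc = acc.reverse ++ pvConsHead cur.reverse (pvSegs l) := by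
  induction l with
  | nil =>
    intro fuel cur acc _
    cases fuel <;> simp [PySem.Chars.splitOn.go, pvConsHead, pvSegs]
  | cons c rest ih =>
    intro fuel cur acc hf
    cases fuel with
    | zero => simp at hf
    | succ f =>
      have hf' : rest.length ≤ f := by
        simp only [List.length_cons] at hf; omega
      simp only [PySem.Chars.splitOn.go]
      by_cases hc : c = '/'
      · subst hc
        have hpre : List.isPrefixOf ['/'] ('/' :: rest) = true := by
          simp [List.isPrefixOf]
        rw [if_pos hpre]
        simp only [List.length_cons, List.length_nil, List.drop_succ_cons, List.drop_zero]
        rw [ih f [] (cur.reverse :: acc) hf']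
        rcases hs : pvSegs rest with _ | ⟨s, ss⟩
        · exact absurd hs (pvSegs_ne_nil rest)
        · simp [pvConsHead, pvSegs, hs]
      · have hpre : List.isPrefixOf ['/'] (c :: rest) = false := by
          simp [List.isPrefixOf]
          exact fun h => absurd h.symm hc
        rw [if_neg (by simp [hpre])]
        rw [ih f (c :: cur) acc hf']
        rcases hs : pvSegs rest with _ | ⟨s, ss⟩
        · exact absurd hs (pvSegs_ne_nil rest)
        · simp [pvConsHead, pvSegs, hs, hc]

theorem pvSplitOn_eq (l : List Char) :
    PySem.Chars.splitOn l ['/'] = pvSegs l := by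
  unfold PySem.Chars.splitOn
  rw [pvSplitOn_go l (l.length + 1) [] [] (by omega)]
  rcases hs : pvSegs l with _ | ⟨s, ss⟩
  · exact absurd hs (pvSegs_ne_nil l)
  · simp [pvConsHead]

-- A's append loop is a map
theorem pvFoldlA (l : List (List Char)) : ∀ acc : List (List Char),
    l.foldl (fun out part => if pvCond part then out ++ [":id".toList] else out ++ [part]) acc
      = acc ++ l.map pvGA := by
  induction l with
  | nil => simp
  | cons x xs ih =>
    intro acc
    simp only [List.foldl_cons]
    by_cases h : pvCond x
    · rw [if_pos h, ih, List.map_cons]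
      simp [pvGA, h]
    · rw [if_neg h, ih, List.map_cons]
      simp [pvGA, h]

-- the fold in port B computes pvOutB
theorem pvFin_fold (l : List Char) : ∀ (res seg : List Char) (hx : Bool),
    pvFin (l.foldl pvStep (res, seg, hx)) = res ++ pvOutB seg hx l := by
  induction l with
  | nil => intro res seg hx; simp [pvOutB, pvFlush, pvFin]
  | cons c rest ih =>
    intro res seg hx
    by_cases hc : c = '/'
    · subst hc
      simp only [List.foldl_cons, pvStep, if_pos rfl, pvOutB]
      rw [ih]
      simp [pvFlush]
    · simp only [List.foldl_cons, pvStep, if_neg hc, pvOutB]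
      rw [ih]
      simp [hc, pvHexB]

-- main induction: the streaming scan produces A's join-of-mapped-segments
theorem pvOutB_eq (l : List Char) : ∀ seg : List Char,
    (∀ c ∈ l, pvDomChar c = true) → (∀ c ∈ seg, pvDomChar c = true) →
    pvOutB seg (seg.all (fun c => pvHexB.contains c)) l
      = PySem.Chars.join ['/'] (List.map pvGA (pvConsHead seg (pvSegs l))) := by
  induction l with
  | nil =>
    intro seg _ hseg
    have h1 : pvConsHead seg (pvSegs []) = [seg] := by simp [pvSegs, pvConsHead]
    rw [h1]
    have h2 : PySem.Chars.join ['/'] (List.map pvGA [seg]) = pvGA seg := by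
      simp [PySem.Chars.join, List.intercalate]
    rw [h2, ← pvFlush_eq_gA seg hseg]
    rfl
  | cons c rest ih =>
    intro seg hl hseg
    have hrest : ∀ c ∈ rest, pvDomChar c = true := fun x hx => hl x (List.mem_cons_of_mem _ hx)
    by_cases hc : c = '/'
    · subst hc
      simp only [pvOutB, if_pos rfl]
      have h2 := ih [] hrest (by simp)
      simp only [List.all_nil] at h2
      rw [h2, pvFlush_eq_gA seg hseg]
      rcases hs : pvSegs rest with _ | ⟨s, ss⟩
      · exact absurd hs (pvSegs_ne_nil rest)
      · simp [pvSegs, pvConsHead, hs, PySem.Chars.join, List.intercalate]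
    · simp only [pvOutB, if_neg hc]
      have hcd : pvDomChar c = true := hl c (List.mem_cons_self ..)
      have hsegc : ∀ x ∈ seg ++ [c], pvDomChar x = true := by
        intro x hx
        rcases List.mem_append.mp hx with h | h
        · exact hseg x h
        · simp at h; subst h; exact hcd
      have h2 := ih (seg ++ [c]) hrest hsegc
      have hall : (seg ++ [c]).all (fun x => pvHexB.contains x)
                = (seg.all (fun x => pvHexB.contains x) && pvHexB.contains c) := by
        simp
      rw [hall] at h2
      rw [h2]
      rcases hs : pvSegs rest with _ | ⟨s, ss⟩
      · exact absurd hs (pvSegs_ne_nil rest)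
      · simp [pvSegs, pvConsHead, hs, hc]

-- ===== VERDICT (by name: the statement is the Claim_ definition above) =====
theorem normalise_path_py_spec : Claim_equal_normalise_path_py := by
  intro path hdom
  unfold Spec_normalise_path_py
  have hchars : ∀ c ∈ path.toList, pvDomChar c = true := by
    intro c hc
    unfold Dom_normalise_path_py pvDomStr at hdom
    exact List.all_eq_true.mp hdom c hc
  rw [pvA_eq, pvB_eq, pvFin_fold path.toList [] [] true]
  have h0 : (([] : List Char).all (fun c => pvHexB.contains c)) = true := by simp
  have hout := pvOutB_eq path.toList [] hchars (by simp)
  rw [h0] at hout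
  rw [List.nil_append, hout, pvSplitOn_eq, pvFoldlA (pvSegs path.toList) []]
  rcases hs : pvSegs path.toList with _ | ⟨s, ss⟩
  · exact absurd hs (pvSegs_ne_nil path.toList)
  · simp [pvConsHead]
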